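-- pv_equiv track=rewrite | github.com/moltools/GraphMiner | GraphMiner/backend/results_analysis.py | create_groups_dendrogram
-- ===== SOURCE A (Python) =====
-- def create_groups_dendrogram(dn):
--     """
--     Create the different groups which are shown in the dendrogram
--
--     input:
--     dn - information resulting from the dendrogram function
--
--     output:
--     vallist - dictionary with as key the groupnumber (str) and as value the
--     substructures (list of str)
--     """
--     vallist = {}
--     groupnum = 0
--     vallist[str(groupnum)] = [dn['ivl'][0]]
--     for index in range(1, len(dn['leaves_color_list'])):
--         if dn['leaves_color_list'][index] != dn['leaves_color_list'][
--             index - 1]: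
--             groupnum += 1
--             vallist[str(groupnum)] = [dn['ivl'][index]]
--         elif dn['leaves_color_list'][index] == dn['leaves_color_list'][
--             index - 1]:
--             vallist[str(groupnum)].append(dn['ivl'][index])
--     return vallist
-- ===== SOURCE B (Python) =====
-- def create_groups_dendrogram(dn):
--     """
--     Create the different groups which are shown in the dendrogram
--
--     Scans the color list for maximal runs of equal consecutive colors and
--     takes each group as one slice of dn['ivl'], enumerating the slices into
--     the result dictionary at the end.
--     """
--     colors = dn['leaves_color_list']
--     ivl = dn['ivl']
--     groups = []
--     i = 0
--     while True:
--         j = i + 1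
--         while j < len(colors) and colors[j] == colors[j - 1]:
--             j += 1
--         groups.append(ivl[i:j])
--         if j >= len(colors):
--             break
--         i = j
--     return {str(g): grp for g, grp in enumerate(groups)}
-- ===== Notes on version B (the rewrite author's own statement) =====
-- stated objective: alternative
-- what changed: replaces the stateful dict-plus-group-counter loop that appends one leaf at a time with a two-pointer scan that finds each maximal color run and takes it as one slice of ivl, enumerating the collected slices into the dict at the end
import Mathlib
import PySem

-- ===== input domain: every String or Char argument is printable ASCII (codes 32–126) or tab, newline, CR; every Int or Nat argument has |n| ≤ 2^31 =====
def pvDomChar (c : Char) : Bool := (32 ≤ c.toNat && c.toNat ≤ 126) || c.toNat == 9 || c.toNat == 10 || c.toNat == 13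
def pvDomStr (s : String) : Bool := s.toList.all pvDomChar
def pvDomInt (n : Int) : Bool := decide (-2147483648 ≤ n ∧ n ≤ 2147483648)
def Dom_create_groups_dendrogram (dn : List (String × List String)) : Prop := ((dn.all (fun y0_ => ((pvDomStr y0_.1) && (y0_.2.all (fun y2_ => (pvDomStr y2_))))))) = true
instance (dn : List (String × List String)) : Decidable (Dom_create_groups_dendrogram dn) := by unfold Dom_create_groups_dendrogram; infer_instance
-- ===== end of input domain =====

-- B replaces A's stateful dict-plus-counter loop with a two-pointer scan that takes each
-- maximal color run as one slice of ivl and enumerates the slices into the dict at the end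
-- (objective: alternative decomposition, same O(n) cost).

-- ===== PORT A =====
-- literal transliteration of A: a dict keyed by str(groupnum), one leaf appended per step
def create_groups_dendrogram (dn : List (String × List String)) : List (String × List String) :=
  let d : PySem.Dict String (List String) := PySem.Dict.mk dn
  let ivl : List String := (d.get? "ivl").getD []
  let colors : List String := (d.get? "leaves_color_list").getD []
  let vallist0 : PySem.Dict String (List String) :=
    (PySem.Dict.empty).insert (PySem.Int.toStr 0) [PySem.List.pyGetD ivl 0 ""]
  let st :=
    (PySem.List.pyRange 1 (colors.length : Int) 1).foldl
      (fun (st : PySem.Dict String (List String) × Int) index =>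
        if PySem.List.pyGetD colors index "" ≠ PySem.List.pyGetD colors (index - 1) "" then
          (st.1.insert (PySem.Int.toStr (st.2 + 1)) [PySem.List.pyGetD ivl index ""], st.2 + 1)
        else if PySem.List.pyGetD colors index "" = PySem.List.pyGetD colors (index - 1) "" then
          (st.1.modify (PySem.Int.toStr st.2) [] (· ++ [PySem.List.pyGetD ivl index ""]), st.2)
        else st)
      (vallist0, (0 : Int))
  st.1.items

-- ===== PORT B =====
-- inner while loop of Source B: advance j while the color run continues
def pvRunEnd (colors : List String) (j : Nat) : Nat :=
  if h : j < colors.length ∧ colors.getD j "" = colors.getD (j - 1) "" then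
    pvRunEnd colors (j + 1)
  else j
termination_by colors.length - j
decreasing_by exact Nat.sub_succ_lt_self _ _ h.1

theorem pvRunEnd_ge (colors : List String) (j : Nat) : j ≤ pvRunEnd colors j := by
  unfold pvRunEnd
  split
  next h => exact Nat.le_trans (Nat.le_succ j) (pvRunEnd_ge colors (j + 1))
  next _ => exact Nat.le_refl j
termination_by colors.length - j
decreasing_by rename_i h; exact Nat.sub_succ_lt_self _ _ h.1

-- outer while loop of Source B: collect one slice per run into the accumulator
def pvRuns (colors ivl : List String) (acc : List (List String)) (i : Nat) : List (List String) :=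
  let j := pvRunEnd colors (i + 1)
  let acc' := acc ++ [PySem.List.slice ivl (some (i : Int)) (some (j : Int))]
  if _h : j < colors.length then pvRuns colors ivl acc' j else acc'
termination_by colors.length - i
decreasing_by
  exact Nat.sub_lt_sub_left
    (Nat.lt_of_lt_of_le (Nat.lt_succ_self i) (Nat.le_trans (pvRunEnd_ge colors (i + 1)) (Nat.le_of_lt _h)))
    (Nat.lt_of_lt_of_le (Nat.lt_succ_self i) (pvRunEnd_ge colors (i + 1)))

def create_groups_dendrogram_alt (dn : List (String × List String)) : List (String × List String) :=
  let d : PySem.Dict String (List String) := PySem.Dict.mk dn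
  let colors : List String := (d.get? "leaves_color_list").getD []
  let ivl : List String := (d.get? "ivl").getD []
  let groups := pvRuns colors ivl [] 0
  ((groups.zipIdx).foldl
    (fun (vd : PySem.Dict String (List String)) p => vd.insert (PySem.Int.toStr (p.2 : Int)) p.1)
    PySem.Dict.empty).items

-- ===== PRECONDITION & SPEC =====
-- Pre_ excludes exactly the inputs where the Python A raises: a missing
-- 'leaves_color_list' or 'ivl' key (KeyError) and an 'ivl' shorter than
-- max(1, len(leaves_color_list)) (IndexError on dn['ivl'][index]).
def Pre_create_groups_dendrogram (dn : List (String × List String)) : Prop :=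
  (PySem.Dict.mk dn).contains "ivl" = true ∧
  (PySem.Dict.mk dn).contains "leaves_color_list" = true ∧
  max 1 (((PySem.Dict.mk dn).get? "leaves_color_list").getD []).length ≤
    (((PySem.Dict.mk dn).get? "ivl").getD []).length

instance (dn : List (String × List String)) : Decidable (Pre_create_groups_dendrogram dn) := by
  unfold Pre_create_groups_dendrogram; infer_instance

def pvWitness_create_groups_dendrogram : (List (String × List String)) :=
  [("ivl", ["a", "b", "c"]), ("leaves_color_list", ["r", "r", "g"])]

def Spec_create_groups_dendrogram (dn : List (String × List String)) (out : List (String × List String)) : Prop := out = create_groups_dendrogram_alt dn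
instance (dn : List (String × List String)) (out : List (String × List String)) : Decidable (Spec_create_groups_dendrogram dn out) := by unfold Spec_create_groups_dendrogram; infer_instance

-- ===== CLAIM (what is proved, stated in full; the proofs are below) =====
def Claim_equal_create_groups_dendrogram : Prop := ∀ (dn : List (String × List String)), Dom_create_groups_dendrogram dn → Pre_create_groups_dendrogram dn → Spec_create_groups_dendrogram dn (create_groups_dendrogram dn)

-- ===== LEMMAS AND PROOFS =====

-- str(k) for a natural k, and injectivity of str on naturals
def pvToStrN (k : Nat) : String := PySem.Int.toStr (k : Int)

theorem pvDigitChar_inj (m n : Nat) (hm : m < 10) (hn : n < 10)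
    (h : Nat.digitChar m = Nat.digitChar n) : m = n := by
  interval_cases m <;> interval_cases n <;> first | rfl | (exact absurd h (by decide))

theorem pvToDigits_inj (m n : Nat) (h : Nat.toDigits 10 m = Nat.toDigits 10 n) : m = n := by
  induction m using Nat.strong_induction_on generalizing n with
  | _ m ih =>
  rw [Nat.toDigits_eq_if (b := 10) (by norm_num), Nat.toDigits_eq_if (n := n) (by norm_num)] at h
  by_cases hm : m < 10 <;> by_cases hn : n < 10
  · rw [if_pos hm, if_pos hn] at h
    simp only [List.cons.injEq, and_true] at h
    exact pvDigitChar_inj m n hm hn h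
  · rw [if_pos hm, if_neg hn] at h
    have hl := congrArg List.length h
    have := @Nat.length_toDigits_pos 10 (n / 10)
    simp only [List.length_append, List.length_cons] at hl; omega
  · rw [if_neg hm, if_pos hn] at h
    have hl := congrArg List.length h
    have := @Nat.length_toDigits_pos 10 (m / 10)
    simp only [List.length_append, List.length_cons] at hl; omega
  · rw [if_neg hm, if_neg hn] at h
    have hl := congrArg List.length h
    simp only [List.length_append, List.length_cons] at hl
    obtain ⟨h1, h2⟩ := List.append_inj h (by omega)
    have e1 : m / 10 = n / 10 := ih (m / 10) (by omega) _ h1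
    have e2 : m % 10 = n % 10 := by
      apply pvDigitChar_inj _ _ (by omega) (by omega)
      simpa using h2
    omega

theorem pvToStrN_inj : Function.Injective pvToStrN := by
  intro a b h
  simp only [pvToStrN, PySem.Int.toStr, PySem.Int.toChars] at h
  rw [if_neg (by omega), if_neg (by omega)] at h
  have h2 := congrArg String.toList h
  simp only [String.toList_ofList] at h2
  exact pvToDigits_inj a b (by simpa using h2)

-- the items list A's dict holds when its groups are gs
def pvLabel (gs : List (List String)) : List (String × List String) :=
  (List.range gs.length).map (fun k => (pvToStrN k, gs.getD k []))

-- A's loop body on the group-list abstraction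
def pvStep (colors ivl : List String) (gs : List (List String)) (index : Int) : List (List String) :=
  if PySem.List.pyGetD colors index "" ≠ PySem.List.pyGetD colors (index - 1) "" then
    gs ++ [[PySem.List.pyGetD ivl index ""]]
  else gs.set (gs.length - 1) (gs.getD (gs.length - 1) [] ++ [PySem.List.pyGetD ivl index ""])

-- A's remaining loop, abstracted: current open group cur, next index j
def pvRunsW (colors ivl : List String) (cur : List String) (j : Nat) : List (List String) :=
  if h : j < colors.length then
    if colors.getD j "" ≠ colors.getD (j - 1) "" then
      cur :: pvRunsW colors ivl [ivl.getD j ""] (j + 1)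
    else pvRunsW colors ivl (cur ++ [ivl.getD j ""]) (j + 1)
  else [cur]
termination_by colors.length - j
decreasing_by all_goals omega

theorem pvLabel_map_fst (gs : List (List String)) :
    (pvLabel gs).map (fun p => p.1) = (List.range gs.length).map pvToStrN := by
  simp [pvLabel, List.map_map, Function.comp]

theorem pvLabel_keys_nodup (gs : List (List String)) :
    (PySem.Dict.mk (pvLabel gs)).keys.Nodup := by
  rw [PySem.Dict.keys_mk, pvLabel_map_fst]
  exact (List.nodup_range).map pvToStrN_inj

theorem pvLabel_contains_len (gs : List (List String)) :
    (PySem.Dict.mk (pvLabel gs)).contains (pvToStrN gs.length) = false := by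
  rw [PySem.Dict.contains_mk]
  simp only [List.any_eq_false, pvLabel, List.mem_map, List.mem_range]
  rintro p ⟨k, hk, rfl⟩
  simp only [beq_iff_eq]
  intro h
  have := pvToStrN_inj h
  omega

theorem pvLabel_get? (gs : List (List String)) (j : Nat) (hj : j < gs.length) :
    (PySem.Dict.mk (pvLabel gs)).get? (pvToStrN j) = some (gs.getD j []) := by
  apply PySem.Dict.get?_of_mem_items _ _ (pvLabel_keys_nodup gs)
  show (pvToStrN j, gs.getD j []) ∈ pvLabel gs
  simp only [pvLabel, List.mem_map, List.mem_range]
  exact ⟨j, hj, rfl⟩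

theorem pvLabel_contains (gs : List (List String)) (j : Nat) (hj : j < gs.length) :
    (PySem.Dict.mk (pvLabel gs)).contains (pvToStrN j) = true := by
  rw [PySem.Dict.contains_eq_isSome_get?, pvLabel_get? gs j hj]
  rfl

theorem pvLabel_append (gs : List (List String)) (v : List String) :
    pvLabel (gs ++ [v]) = pvLabel gs ++ [(pvToStrN gs.length, v)] := by
  simp only [pvLabel, List.length_append, List.length_cons, List.length_nil,
    List.range_succ, List.map_append, List.map_cons, List.map_nil]
  congr 1
  · apply List.map_congr_left
    intro k hk
    rw [List.mem_range] at hk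
    rw [List.getD_append _ _ _ _ hk]
  · simp [List.getD]

theorem pvLabel_set (gs : List (List String)) (j : Nat) (w : List String) (hj : j < gs.length) :
    (pvLabel gs).map (fun p => if p.1 == pvToStrN j then (pvToStrN j, w) else p) =
      pvLabel (gs.set j w) := by
  simp only [pvLabel, List.map_map, List.length_set]
  apply List.map_congr_left
  intro k hk
  rw [List.mem_range] at hk
  simp only [Function.comp]
  by_cases hkj : k = j
  · subst hkj
    simp [List.getD, hk]
  · have hb : (pvToStrN k == pvToStrN j) = false :=
      beq_eq_false_iff_ne.mpr (fun h => hkj (pvToStrN_inj h))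
    rw [if_neg (by simp [hb])]
    have h2 : j ≠ k := fun h => hkj h.symm
    simp [List.getD, h2]

-- one step of A's dict loop tracks pvStep on the group list
theorem pvStepDict (colors ivl : List String) (gs : List (List String)) (hne : gs ≠ [])
    (i : Int) :
    (fun (st : PySem.Dict String (List String) × Int) index =>
        if PySem.List.pyGetD colors index "" ≠ PySem.List.pyGetD colors (index - 1) "" then
          (st.1.insert (PySem.Int.toStr (st.2 + 1)) [PySem.List.pyGetD ivl index ""], st.2 + 1)
        else if PySem.List.pyGetD colors index "" = PySem.List.pyGetD colors (index - 1) "" then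
          (st.1.modify (PySem.Int.toStr st.2) [] (· ++ [PySem.List.pyGetD ivl index ""]), st.2)
        else st)
      (PySem.Dict.mk (pvLabel gs), (gs.length : Int) - 1) i =
    (PySem.Dict.mk (pvLabel (pvStep colors ivl gs i)),
      ((pvStep colors ivl gs i).length : Int) - 1) := by
  have hlen : 1 ≤ gs.length := List.length_pos_iff.mpr hne
  simp only [pvStep]
  by_cases hc : PySem.List.pyGetD colors i "" ≠ PySem.List.pyGetD colors (i - 1) ""
  · rw [if_pos hc]
    simp only [if_pos hc]
    have hkey : (gs.length : Int) - 1 + 1 = ((gs.length : Nat) : Int) := by ring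
    rw [hkey]
    simp only [Prod.mk.injEq]
    constructor
    · apply PySem.Dict.ext
      rw [show PySem.Int.toStr ((gs.length : Nat) : Int) = pvToStrN gs.length from rfl]
      rw [PySem.Dict.items_insert_of_not_contains _ _ (pvLabel_contains_len gs)]
      show pvLabel gs ++ [(pvToStrN gs.length, _)] = _
      rw [← pvLabel_append]
    · simp only [List.length_append, List.length_cons, List.length_nil]
      push_cast; ring
  · rw [if_neg hc, if_pos (not_not.mp (fun h => hc (fun he => h he)))]
    rw [if_neg hc]
    have hkey : (gs.length : Int) - 1 = ((gs.length - 1 : Nat) : Int) := by omega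
    rw [hkey]
    have hj : gs.length - 1 < gs.length := by omega
    have hmod : ∀ (d : PySem.Dict String (List String)) (k : String) (f : List String → List String),
        d.modify k [] f = d.insert k (f (d.getD k [])) := fun _ _ _ => rfl
    rw [hmod]
    simp only [Prod.mk.injEq]
    constructor
    · apply PySem.Dict.ext
      rw [show PySem.Int.toStr (((gs.length - 1 : Nat)) : Int) = pvToStrN (gs.length - 1) from rfl]
      rw [PySem.Dict.items_insert_of_contains _ _ (pvLabel_contains gs _ hj)]
      show (pvLabel gs).map _ = pvLabel (gs.set (gs.length - 1) _)
      rw [PySem.Dict.getD_eq_get?_getD, pvLabel_get? gs _ hj]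
      exact pvLabel_set gs (gs.length - 1) _ hj
    · rw [List.length_set]
      omega

theorem pvStep_ne_nil (colors ivl : List String) (gs : List (List String)) (hne : gs ≠ [])
    (i : Int) : pvStep colors ivl gs i ≠ [] := by
  have hlen : 1 ≤ gs.length := List.length_pos_iff.mpr hne
  unfold pvStep
  split
  · simp
  · intro h
    have := congrArg List.length h
    simp only [List.length_set, List.length_nil] at this
    omega

-- A's dict fold equals pvLabel of the group-list fold
theorem pvFoldA (colors ivl : List String) (l : List Int) :
    ∀ (gs : List (List String)), gs ≠ [] →
    (l.foldl
      (fun (st : PySem.Dict String (List String) × Int) index =>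
        if PySem.List.pyGetD colors index "" ≠ PySem.List.pyGetD colors (index - 1) "" then
          (st.1.insert (PySem.Int.toStr (st.2 + 1)) [PySem.List.pyGetD ivl index ""], st.2 + 1)
        else if PySem.List.pyGetD colors index "" = PySem.List.pyGetD colors (index - 1) "" then
          (st.1.modify (PySem.Int.toStr st.2) [] (· ++ [PySem.List.pyGetD ivl index ""]), st.2)
        else st)
      (PySem.Dict.mk (pvLabel gs), (gs.length : Int) - 1)) =
    (PySem.Dict.mk (pvLabel (l.foldl (pvStep colors ivl) gs)),
      ((l.foldl (pvStep colors ivl) gs).length : Int) - 1) := by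
  induction l with
  | nil => intro gs _; rfl
  | cons i l ih =>
    intro gs hne
    rw [List.foldl_cons, List.foldl_cons]
    have h := ih (pvStep colors ivl gs i) (pvStep_ne_nil colors ivl gs hne i)
    rw [← pvStepDict colors ivl gs hne i] at h
    exact h

theorem pvSetAppend (gs : List (List String)) (cur v : List String) :
    (gs ++ [cur]).set gs.length v = gs ++ [v] := by
  induction gs with
  | nil => rfl
  | cons a t ih => simp [ih]

theorem pvGetDAppend (gs : List (List String)) (cur : List String) :
    (gs ++ [cur]).getD gs.length [] = cur := by
  induction gs with
  | nil => rfl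
  | cons a t ih => simp [ih]

-- the group-list fold over range j..n equals the run recursion
theorem pvFoldStep (colors ivl : List String) :
    ∀ (fuel j : Nat), 1 ≤ j → colors.length - j ≤ fuel →
    ∀ (gs : List (List String)) (cur : List String),
    ((PySem.List.pyRange (j : Int) (colors.length : Int) 1).foldl (pvStep colors ivl) (gs ++ [cur])) =
      gs ++ pvRunsW colors ivl cur j := by
  intro fuel
  induction fuel with
  | zero =>
    intro j hj hf gs cur
    rw [PySem.List.pyRange_one_eq_nil (by exact_mod_cast (by omega : colors.length ≤ j))]
    rw [List.foldl_nil]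
    unfold pvRunsW
    rw [dif_neg (by omega)]
  | succ f ihf =>
    intro j hj hf gs cur
    by_cases hjn : j < colors.length
    · rw [PySem.List.pyRange_one_cons (by exact_mod_cast hjn)]
      rw [List.foldl_cons]
      have c1 : PySem.List.pyGetD colors (j : Int) "" = colors.getD j "" := by simp
      have c2 : PySem.List.pyGetD colors ((j : Int) - 1) "" = colors.getD (j - 1) "" := by
        rw [show ((j : Int) - 1) = ((j - 1 : Nat) : Int) by omega]; simp
      have c3 : PySem.List.pyGetD ivl (j : Int) "" = ivl.getD j "" := by simp
      have hcast : (j : Int) + 1 = ((j + 1 : Nat) : Int) := by push_cast; ring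
      unfold pvRunsW
      rw [dif_pos hjn]
      simp only [pvStep, c1, c2, c3]
      by_cases hne : colors.getD j "" ≠ colors.getD (j - 1) ""
      · rw [if_pos hne, if_pos hne, hcast]
        rw [show (gs ++ [cur]) ++ [[ivl.getD j ""]] = (gs ++ [cur]) ++ [[ivl.getD j ""]] from rfl]
        rw [ihf (j + 1) (by omega) (by omega) (gs ++ [cur]) [ivl.getD j ""]]
        simp [List.append_assoc]
      · rw [if_neg hne, if_neg hne, hcast]
        have hL : (gs ++ [cur]).length - 1 = gs.length := by simp
        rw [hL, pvGetDAppend gs cur, pvSetAppend gs cur (cur ++ [ivl.getD j ""])]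
        exact ihf (j + 1) (by omega) (by omega) gs (cur ++ [ivl.getD j ""])
    · rw [PySem.List.pyRange_one_eq_nil (by exact_mod_cast (by omega : colors.length ≤ j))]
      rw [List.foldl_nil]
      unfold pvRunsW
      rw [dif_neg hjn]

theorem pvSliceCons (ivl : List String) (j e : Nat) (hje : j < e) (hj : j < ivl.length) :
    ivl.getD j "" :: PySem.List.slice ivl (some ((j + 1 : Nat) : Int)) (some (e : Int)) =
      PySem.List.slice ivl (some (j : Int)) (some (e : Int)) := by
  rw [PySem.List.slice_natCast, PySem.List.slice_natCast]
  rw [List.drop_eq_getElem_cons hj]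
  rw [show e - j = (e - (j + 1)) + 1 by omega]
  rw [List.take_succ_cons]
  simp [List.getD, List.getElem?_eq_getElem hj]

theorem pvRuns_eq (colors ivl : List String) (acc : List (List String)) (i : Nat) :
    pvRuns colors ivl acc i =
      if pvRunEnd colors (i + 1) < colors.length
      then pvRuns colors ivl
        (acc ++ [PySem.List.slice ivl (some (i : Int)) (some ((pvRunEnd colors (i + 1) : Nat) : Int))])
        (pvRunEnd colors (i + 1))
      else acc ++ [PySem.List.slice ivl (some (i : Int)) (some ((pvRunEnd colors (i + 1) : Nat) : Int))] := by
  rw [pvRuns]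
  by_cases h : pvRunEnd colors (i + 1) < colors.length
  · rw [dif_pos h, if_pos h]
  · rw [dif_neg h, if_neg h]

theorem pvRuns_acc (colors ivl : List String) :
    ∀ (fuel i : Nat), colors.length - i ≤ fuel → ∀ (acc : List (List String)),
    pvRuns colors ivl acc i = acc ++ pvRuns colors ivl [] i := by
  intro fuel
  induction fuel with
  | zero =>
    intro i hf acc
    have hge := pvRunEnd_ge colors (i + 1)
    have hnn : ¬ pvRunEnd colors (i + 1) < colors.length := by omega
    rw [pvRuns_eq colors ivl acc i, pvRuns_eq colors ivl [] i]
    rw [if_neg hnn, if_neg hnn]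
    simp
  | succ f ihf =>
    intro i hf acc
    have hge := pvRunEnd_ge colors (i + 1)
    rw [pvRuns_eq colors ivl acc i, pvRuns_eq colors ivl [] i]
    by_cases hj : pvRunEnd colors (i + 1) < colors.length
    · rw [if_pos hj, if_pos hj]
      rw [ihf (pvRunEnd colors (i + 1)) (by omega)
            (acc ++ [PySem.List.slice ivl (some (i : Int)) (some ((pvRunEnd colors (i + 1) : Nat) : Int))]),
          ihf (pvRunEnd colors (i + 1)) (by omega)
            ([] ++ [PySem.List.slice ivl (some (i : Int)) (some ((pvRunEnd colors (i + 1) : Nat) : Int))])]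
      simp [List.append_assoc]
    · rw [if_neg hj, if_neg hj]
      simp

theorem pvRuns_nil (colors ivl : List String) (i : Nat) :
    pvRuns colors ivl [] i =
      PySem.List.slice ivl (some (i : Int)) (some ((pvRunEnd colors (i + 1) : Nat) : Int)) ::
        (if pvRunEnd colors (i + 1) < colors.length
          then pvRuns colors ivl [] (pvRunEnd colors (i + 1)) else []) := by
  conv_lhs => rw [pvRuns_eq colors ivl [] i]
  by_cases hj : pvRunEnd colors (i + 1) < colors.length
  · rw [if_pos hj, if_pos hj]
    rw [pvRuns_acc colors ivl colors.length (pvRunEnd colors (i + 1)) (by omega)]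
    simp
  · rw [if_neg hj, if_neg hj]
    simp

-- the run recursion with open group cur equals B's slice-per-run list
theorem pvRunsW_eq (colors ivl : List String) (hlen : colors.length ≤ ivl.length) :
    ∀ (fuel j : Nat), 1 ≤ j → colors.length - j ≤ fuel → ∀ (cur : List String),
    pvRunsW colors ivl cur j =
      (cur ++ PySem.List.slice ivl (some (j : Int)) (some ((pvRunEnd colors j : Nat) : Int))) ::
        (if pvRunEnd colors j < colors.length
          then pvRuns colors ivl [] (pvRunEnd colors j) else []) := by
  intro fuel
  induction fuel with
  | zero =>
    intro j hj hf cur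
    have hjn : ¬ j < colors.length := by omega
    unfold pvRunsW
    rw [dif_neg hjn]
    have hre : pvRunEnd colors j = j := by
      rw [pvRunEnd]; rw [dif_neg (fun hcon => hjn hcon.1)]
    rw [hre, PySem.List.slice_natCast]
    simp [hjn]
  | succ f ihf =>
    intro j hj hf cur
    by_cases hjn : j < colors.length
    · have hjivl : j < ivl.length := by omega
      have hge := pvRunEnd_ge colors (j + 1)
      by_cases heq : colors.getD j "" = colors.getD (j - 1) ""
      · have hre : pvRunEnd colors j = pvRunEnd colors (j + 1) := by
          rw [pvRunEnd]; rw [dif_pos ⟨hjn, heq⟩]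
        unfold pvRunsW
        rw [dif_pos hjn, if_neg (fun hc => hc heq)]
        rw [ihf (j + 1) (by omega) (by omega) (cur ++ [ivl.getD j ""])]
        rw [hre]
        congr 1
        rw [List.append_assoc]
        congr 1
        simpa using pvSliceCons ivl j (pvRunEnd colors (j + 1)) (by omega) hjivl
      · have hre : pvRunEnd colors j = j := by
          rw [pvRunEnd]; rw [dif_neg (fun hcon => heq hcon.2)]
        unfold pvRunsW
        rw [dif_pos hjn, if_pos heq]
        rw [hre, PySem.List.slice_natCast]
        simp only [Nat.sub_self, List.take_zero, List.append_nil]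
        rw [if_pos hjn]
        congr 1
        rw [ihf (j + 1) (by omega) (by omega) [ivl.getD j ""]]
        rw [pvRuns_nil colors ivl j]
        congr 1
        simpa using pvSliceCons ivl j (pvRunEnd colors (j + 1)) (by omega) hjivl
    · have hre : pvRunEnd colors j = j := by
        rw [pvRunEnd]; rw [dif_neg (fun hcon => hjn hcon.1)]
      unfold pvRunsW
      rw [dif_neg hjn]
      rw [hre, PySem.List.slice_natCast]
      simp [hjn]

theorem pvB_items (groups : List (List String)) :
    ((groups.zipIdx).foldl
      (fun (vd : PySem.Dict String (List String)) p => vd.insert (PySem.Int.toStr (p.2 : Int)) p.1)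
      PySem.Dict.empty).items = pvLabel groups := by
  have hmap : groups.zipIdx.map (fun p => PySem.Int.toStr ((p.2 : Nat) : Int)) =
      (List.range groups.length).map pvToStrN := by
    apply List.ext_getElem (by simp)
    intro i h1 h2
    simp [List.getElem_zipIdx, pvToStrN]
  rw [PySem.Dict.items_foldl_insert_fresh groups.zipIdx
    (fun p => PySem.Int.toStr ((p.2 : Nat) : Int)) (fun p => p.1) PySem.Dict.empty
    (fun a _ => PySem.Dict.contains_empty _)
    (by rw [hmap]; exact List.nodup_range.map pvToStrN_inj)]
  show [] ++ groups.zipIdx.map _ = pvLabel groups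
  rw [List.nil_append]
  apply List.ext_getElem (by simp [pvLabel])
  intro i h1 h2
  have hg : i < groups.length := by simpa [pvLabel] using h2
  simp [List.getElem_zipIdx, pvLabel, pvToStrN, List.getD,
    List.getElem?_eq_getElem hg]

-- ===== VERDICT (by name: the statement is the Claim_ definition above) =====
theorem create_groups_dendrogram_spec : Claim_equal_create_groups_dendrogram := by
  intro dn _ hpre
  obtain ⟨hiv, hcl, hlen⟩ := hpre
  unfold Spec_create_groups_dendrogram
  simp only [create_groups_dendrogram, create_groups_dendrogram_alt]
  have h1 : 1 ≤ (((PySem.Dict.mk dn).get? "ivl").getD []).length := le_trans (le_max_left _ _) hlen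
  have h2 : (((PySem.Dict.mk dn).get? "leaves_color_list").getD []).length ≤
      (((PySem.Dict.mk dn).get? "ivl").getD []).length := le_trans (le_max_right _ _) hlen
  set ivl : List String := ((PySem.Dict.mk dn).get? "ivl").getD [] with hivl
  set colors : List String := ((PySem.Dict.mk dn).get? "leaves_color_list").getD [] with hcolors
  have hinit : (PySem.Dict.empty.insert (PySem.Int.toStr 0) [PySem.List.pyGetD ivl 0 ""])
      = PySem.Dict.mk (pvLabel [[PySem.List.pyGetD ivl 0 ""]]) := by
    apply PySem.Dict.ext
    rw [PySem.Dict.items_insert_of_not_contains _ _ (PySem.Dict.contains_empty _)]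
    show [] ++ [(PySem.Int.toStr 0, _)] = pvLabel [[_]]
    simp [pvLabel, pvToStrN]
  rw [hinit]
  have HA := pvFoldA colors ivl (PySem.List.pyRange 1 (colors.length : Int) 1)
      [[PySem.List.pyGetD ivl 0 ""]] (by simp)
  have e0 : (([[PySem.List.pyGetD ivl 0 ""]].length : Nat) : Int) - 1 = 0 := by simp
  rw [e0] at HA
  rw [HA]
  have HS := pvFoldStep colors ivl colors.length 1 (le_refl 1) (by omega)
      [] [PySem.List.pyGetD ivl 0 ""]
  push_cast at HS
  simp only [List.nil_append] at HS
  rw [HS]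
  have HW := pvRunsW_eq colors ivl h2 colors.length 1 (le_refl 1) (by omega)
      [PySem.List.pyGetD ivl 0 ""]
  push_cast at HW
  rw [HW]
  rw [pvB_items]
  rw [pvRuns_nil colors ivl 0]
  have hx0 : PySem.List.pyGetD ivl 0 "" = ivl.getD 0 "" := by
    simpa using PySem.List.pyGetD_zero ivl ""
  have hge1 := pvRunEnd_ge colors 1
  have hcons := pvSliceCons ivl 0 (pvRunEnd colors 1) (by omega) (by omega)
  norm_num at hcons ⊢
  rw [hx0]
  rw [← hcons]
  simp [List.getD]
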